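-- pv_equiv track=rewrite | github.com/ZongyuWu97/LeetCode | UnionFind/Graph_Connectivity_With_Threshold.py | areConnected
-- ===== SOURCE A (Python) =====
-- from typing import List
--
-- def areConnected(n: int, threshold: int, queries: List[List[int]]) -> List[bool]:
--     UF = {}
--
--     def find(x):
--         if not x in UF:
--             UF[x] = x
--
--         if x != UF[x]:
--             UF[x] = find(UF[x])
--
--         return UF[x]
--
--     def union(x, y):
--         rootX = find(x)
--         rootY = find(y)
--
--         UF[rootX] = rootY
--
--     def connect(i, j, threshold):
--         for num in range(threshold + 1, min(i, j) + 1):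
--             if i % num == 0 and j % num == 0:
--                 return True
--         return False
--
--     for num in range(threshold + 1, n + 1):
--         mul = 2
--         while num * mul <= n:
--             union(num, num * mul)
--             mul += 1
--
--     res = []
--     for a, b in queries:
--         res.append(find(a) == find(b))
--
--     return res
-- ===== SOURCE B (Python) =====
-- from typing import List
--
--
-- def areConnected(n: int, threshold: int, queries: List[List[int]]) -> List[bool]:
--     # Explicit divisor-graph traversal: sweep 1..n, flood each unvisited
--     # component by BFS (neighbors = multiples and large-enough divisors,
--     # computed on demand), label every member with the component's first
--     # (smallest) vertex, then answer each query by comparing labels.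
--     def nbrs(x):
--         out = []
--         if threshold < x <= n:
--             out.extend(range(2 * x, n + 1, x))
--         if 1 <= x <= n:
--             i = 1
--             while i * i <= x:
--                 if x % i == 0:
--                     for d in (i, x // i):
--                         if threshold < d <= x // 2:
--                             out.append(d)
--                 i += 1
--         return out
--
--     comp = {}
--     for v in range(1, n + 1):
--         if v not in comp:
--             comp[v] = v
--             frontier = [v]
--             while frontier:
--                 new = []
--                 for x in frontier:
--                     for y in nbrs(x):
--                         if y not in comp:
--                             comp[y] = v
--                             new.append(y)
--                 frontier = new
--
--     return [comp.get(a, a) == comp.get(b, b) for a, b in queries]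
-- ===== Notes on version B (the rewrite author's own statement) =====
-- stated objective: alternative
-- what changed: Replaces the incremental recursive union-find over a parent dict with an explicit divisor-graph traversal: a sweep over 1..n that BFS-floods each not-yet-visited connected component (neighbours = multiples and above-threshold divisors, computed on demand), labels every vertex with its component's smallest element, and answers each query by comparing labels.
import Mathlib
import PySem

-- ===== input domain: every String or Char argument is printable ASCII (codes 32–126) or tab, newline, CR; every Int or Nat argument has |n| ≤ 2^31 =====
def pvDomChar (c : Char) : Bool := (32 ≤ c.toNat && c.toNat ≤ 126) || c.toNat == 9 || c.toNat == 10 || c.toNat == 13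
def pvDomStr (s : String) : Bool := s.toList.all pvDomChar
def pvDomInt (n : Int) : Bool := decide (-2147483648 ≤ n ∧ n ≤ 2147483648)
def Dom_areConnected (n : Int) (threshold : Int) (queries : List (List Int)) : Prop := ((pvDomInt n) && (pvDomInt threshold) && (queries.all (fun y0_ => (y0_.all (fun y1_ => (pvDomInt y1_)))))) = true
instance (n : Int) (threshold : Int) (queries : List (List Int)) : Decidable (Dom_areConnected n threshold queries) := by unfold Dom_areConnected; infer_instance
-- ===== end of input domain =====

-- B replaces A's incremental recursive union-find with an explicit traversal of the
-- divisor graph: a sweep over 1..n that BFS-floods each unvisited component and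
-- labels its members, queries compared by label; equivalence is about return values.

-- ===== PORT A =====
-- `find` with path compression; the fuel only makes the recursion total
-- (on valid states the parent chain is shorter than the dict, so fuel never runs out).
def findA : Nat → PySem.Dict Int Int → Int → PySem.Dict Int Int × Int
  | 0, UF, x => (UF, x)
  | f+1, UF, x =>
    let UF1 := if UF.contains x then UF else UF.insert x x   -- if not x in UF: UF[x] = x
    let p := UF1.getD x x
    if x ≠ p then                                            -- if x != UF[x]:
      let r := findA f UF1 p                                 --   UF[x] = find(UF[x])
      (r.1.insert x r.2, r.2)
    else (UF1, p)                                            -- return UF[x]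

def findTop (UF : PySem.Dict Int Int) (x : Int) : PySem.Dict Int Int × Int :=
  findA (UF.size + 1) UF x

def unionA (UF : PySem.Dict Int Int) (x y : Int) : PySem.Dict Int Int :=
  let r1 := findTop UF x
  let r2 := findTop r1.1 y
  r2.1.insert r1.2 r2.2                                      -- UF[rootX] = rootY

-- while num * mul <= n: union(num, num*mul); mul += 1   (fuel = n.toNat+1 suffices)
def whileA (n num : Int) : Nat → Int → PySem.Dict Int Int → PySem.Dict Int Int
  | 0, _, UF => UF
  | f+1, mul, UF =>
    if num * mul ≤ n then whileA n num f (mul + 1) (unionA UF num (num * mul)) else UF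

def outerA (n : Int) (UF : PySem.Dict Int Int) (num : Int) : PySem.Dict Int Int :=
  whileA n num (n.toNat + 1) 2 UF

def qstepA (st : PySem.Dict Int Int × List Bool) (q : List Int) : PySem.Dict Int Int × List Bool :=
  let r1 := findTop st.1 (PySem.List.pyGetD q 0 0)           -- a, b = q ;  find(a)
  let r2 := findTop r1.1 (PySem.List.pyGetD q 1 0)           -- find(b)
  (r2.1, st.2 ++ [decide (r1.2 = r2.2)])                     -- res.append(find(a) == find(b))

def areConnected (n : Int) (threshold : Int) (queries : List (List Int)) : List Bool :=
  let UF := (PySem.List.pyRange (threshold + 1) (n + 1) 1).foldl (outerA n) PySem.Dict.empty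
  (queries.foldl qstepA (UF, ([] : List Bool))).2

-- ===== PORT B =====
-- divisor half of nbrs: i = 1; while i*i <= x: if x % i == 0: for d in (i, x//i): …
def divLoop (t x : Int) : Nat → Int → List Int
  | 0, _ => []
  | f+1, i =>
    if i * i ≤ x then
      ((if PySem.Int.mod x i == 0 then
          (if t < i ∧ i ≤ PySem.Int.floordiv x 2 then [i] else []) ++
          (if t < PySem.Int.floordiv x i ∧ PySem.Int.floordiv x i ≤ PySem.Int.floordiv x 2
           then [PySem.Int.floordiv x i] else [])
        else []) ++ divLoop t x f (i + 1))
    else []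

def nbrsB (n t x : Int) : List Int :=
  (if t < x ∧ x ≤ n then PySem.List.pyRange (2 * x) (n + 1) x else []) ++
  (if 1 ≤ x ∧ x ≤ n then divLoop t x (x.toNat + 1) 1 else [])

-- if y not in comp: comp[y] = v; new.append(y)
def addY (v : Int) (st : PySem.Dict Int Int × List Int) (y : Int) :
    PySem.Dict Int Int × List Int :=
  if st.1.contains y then st else (st.1.insert y v, st.2 ++ [y])

def expandX (n t v : Int) (st : PySem.Dict Int Int × List Int) (x : Int) :
    PySem.Dict Int Int × List Int :=
  (nbrsB n t x).foldl (addY v) st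

-- while frontier: new = []; …; frontier = new   (fuel = n.toNat+2 suffices)
def floodB (n t v : Int) : Nat → PySem.Dict Int Int → List Int → PySem.Dict Int Int
  | 0, comp, _ => comp
  | f+1, comp, frontier =>
    if frontier.isEmpty then comp
    else
      let st := frontier.foldl (expandX n t v) (comp, [])
      floodB n t v f st.1 st.2

def sweepB (n t : Int) (comp : PySem.Dict Int Int) (v : Int) : PySem.Dict Int Int :=
  if comp.contains v then comp
  else floodB n t v (n.toNat + 2) (comp.insert v v) [v]

def areConnected_alt (n : Int) (threshold : Int) (queries : List (List Int)) : List Bool :=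
  let comp := (PySem.List.pyRange 1 (n + 1) 1).foldl (sweepB n threshold) PySem.Dict.empty
  queries.map (fun q =>
    decide (comp.getD (PySem.List.pyGetD q 0 0) (PySem.List.pyGetD q 0 0)
          = comp.getD (PySem.List.pyGetD q 1 0) (PySem.List.pyGetD q 1 0)))

-- ===== PRECONDITION & SPEC =====
-- Pre_ excludes only inputs where Python A does not return: with threshold < 0 and
-- threshold < n the while loop runs forever (num ≤ 0 gives num*mul ≤ n for every mul),
-- and a query row whose length is not 2 raises ValueError at 'for a, b in queries'.
def Pre_areConnected (n : Int) (threshold : Int) (queries : List (List Int)) : Prop :=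
  (0 ≤ threshold ∨ n ≤ threshold) ∧ ∀ q ∈ queries, q.length = 2
instance (n : Int) (threshold : Int) (queries : List (List Int)) : Decidable (Pre_areConnected n threshold queries) := by unfold Pre_areConnected; infer_instance

def pvWitness_areConnected : Int × Int × List (List Int) := (10, 3, [[1, 2], [2, 4], [3, 6], [4, 8]])

def Spec_areConnected (n : Int) (threshold : Int) (queries : List (List Int)) (out : List Bool) : Prop := out = areConnected_alt n threshold queries
instance (n : Int) (threshold : Int) (queries : List (List Int)) (out : List Bool) : Decidable (Spec_areConnected n threshold queries out) := by unfold Spec_areConnected; infer_instance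

-- ===== CLAIM (what is proved, stated in full; the proofs are below) =====
def Claim_equal_areConnected : Prop := ∀ (n : Int) (threshold : Int) (queries : List (List Int)), Dom_areConnected n threshold queries → Pre_areConnected n threshold queries → Spec_areConnected n threshold queries (areConnected n threshold queries)

-- ===== LEMMAS AND PROOFS =====

-- the edge relation of A's union loop, and connectivity (its symmetric reachability)
def EdgeR (n t u w : Int) : Prop :=
  t + 1 ≤ u ∧ u ≤ n ∧ ∃ m : Int, 2 ≤ m ∧ w = u * m ∧ w ≤ n

def SE (n t : Int) (x y : Int) : Prop := EdgeR n t x y ∨ EdgeR n t y x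

def Reach (n t : Int) (v y : Int) : Prop := Relation.ReflTransGen (SE n t) v y

-- ---- semantic layer for A's union-find dict ----
def pstep (UF : PySem.Dict Int Int) (x : Int) : Int := UF.getD x x

def rootN : Nat → PySem.Dict Int Int → Int → Int
  | 0, _, x => x
  | f+1, UF, x => if pstep UF x = x then x else rootN f UF (pstep UF x)

def rootD (UF : PySem.Dict Int Int) (x : Int) : Int := rootN (UF.size + 1) UF x

def ValidW (UF : PySem.Dict Int Int) (h : Int → Nat) : Prop :=
  ∀ x p, UF.get? x = some p → p ≠ x → (UF.contains p = true ∧ h p < h x)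

def mcard (UF : PySem.Dict Int Int) (h : Int → Nat) (x : Int) : Nat :=
  ((UF.keys).toFinset.filter (fun y => h y < h x)).card

lemma pstep_nonkey {UF : PySem.Dict Int Int} {x : Int} (h : UF.contains x = false) :
    pstep UF x = x := by
  simp [pstep, PySem.Dict.getD_of_not_contains _ _ h]

lemma pstep_edge {UF : PySem.Dict Int Int} {x : Int} (h : pstep UF x ≠ x) :
    UF.get? x = some (pstep UF x) := by
  cases hg : UF.get? x with
  | none => exact absurd (by simp [pstep, PySem.Dict.getD_eq_get?_getD, hg]) h
  | some p => simp [pstep, PySem.Dict.getD_eq_get?_getD, hg]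

lemma mcard_lt {UF : PySem.Dict Int Int} {h : Int → Nat} (hv : ValidW UF h) {x : Int}
    (hx : pstep UF x ≠ x) : mcard UF h (pstep UF x) < mcard UF h x := by
  obtain ⟨hk, hlt⟩ := hv x (pstep UF x) (pstep_edge hx) hx
  apply Finset.card_lt_card
  constructor
  · intro y hy
    simp only [Finset.mem_filter] at hy ⊢
    exact ⟨hy.1, lt_trans hy.2 hlt⟩
  · intro hsub
    have hmem : pstep UF x ∈ (UF.keys).toFinset.filter (fun y => h y < h x) := by
      simp only [Finset.mem_filter, List.mem_toFinset]
      exact ⟨(PySem.Dict.contains_iff_mem_keys _ _).mp hk, hlt⟩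
    have := hsub hmem
    simp only [Finset.mem_filter] at this
    omega

lemma mcard_le_size (UF : PySem.Dict Int Int) (h : Int → Nat) (x : Int) :
    mcard UF h x ≤ UF.size := by
  calc mcard UF h x ≤ (UF.keys).toFinset.card := Finset.card_filter_le _ _
    _ ≤ UF.keys.length := List.toFinset_card_le _
    _ = UF.size := by simp [PySem.Dict.keys, PySem.Dict.size]

lemma rootN_eq {UF : PySem.Dict Int Int} {h : Int → Nat} (hv : ValidW UF h) :
    ∀ (f g : Nat) (x : Int), mcard UF h x < f → mcard UF h x < g →
      rootN f UF x = rootN g UF x := by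
  intro f
  induction f with
  | zero => intro g x hf; omega
  | succ f ih =>
    intro g x hf hg
    cases g with
    | zero => omega
    | succ g =>
      simp only [rootN]
      by_cases hp : pstep UF x = x
      · simp [hp]
      · simp only [hp]
        have hm := mcard_lt hv hp
        exact ih g (pstep UF x) (by omega) (by omega)

lemma rootD_of_fix {UF : PySem.Dict Int Int} {x : Int} (h : pstep UF x = x) :
    rootD UF x = x := by
  simp [rootD, rootN, h]

lemma rootD_nonkey {UF : PySem.Dict Int Int} {x : Int} (h : UF.contains x = false) :
    rootD UF x = x := rootD_of_fix (pstep_nonkey h)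

lemma rootD_step {UF : PySem.Dict Int Int} {h : Int → Nat} (hv : ValidW UF h) {x : Int}
    (hx : pstep UF x ≠ x) : rootD UF x = rootD UF (pstep UF x) := by
  have hm := mcard_lt hv hx
  have hms := mcard_le_size UF h x
  have := rootN_eq hv (UF.size) (UF.size + 1) (pstep UF x) (by omega) (by omega)
  simp only [rootD, rootN, if_neg hx]
  exact this

lemma rootD_fix {UF : PySem.Dict Int Int} {h : Int → Nat} (hv : ValidW UF h) (x : Int) :
    pstep UF (rootD UF x) = rootD UF x := by
  suffices H : ∀ (N : Nat) (x : Int), mcard UF h x ≤ N → pstep UF (rootD UF x) = rootD UF x by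
    exact H (mcard UF h x) x le_rfl
  intro N
  induction N with
  | zero =>
    intro x hN
    by_cases hp : pstep UF x = x
    · rw [rootD_of_fix hp]; exact hp
    · have := mcard_lt hv hp; omega
  | succ N ih =>
    intro x hN
    by_cases hp : pstep UF x = x
    · rw [rootD_of_fix hp]; exact hp
    · rw [rootD_step hv hp]
      exact ih (pstep UF x) (by have := mcard_lt hv hp; omega)

lemma root_eq_of {UF : PySem.Dict Int Int} {h : Int → Nat} (hv : ValidW UF h) (ρ : Int → Int)
    (h1 : ∀ z, pstep UF z = z → ρ z = z)
    (h2 : ∀ z, pstep UF z ≠ z → ρ z = ρ (pstep UF z)) :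
    ∀ x, rootD UF x = ρ x := by
  suffices H : ∀ (N : Nat) (x : Int), mcard UF h x ≤ N → rootD UF x = ρ x by
    exact fun x => H (mcard UF h x) x le_rfl
  intro N
  induction N with
  | zero =>
    intro x hN
    by_cases hp : pstep UF x = x
    · rw [rootD_of_fix hp, h1 x hp]
    · have := mcard_lt hv hp; omega
  | succ N ih =>
    intro x hN
    by_cases hp : pstep UF x = x
    · rw [rootD_of_fix hp, h1 x hp]
    · rw [rootD_step hv hp, h2 x hp]
      exact ih (pstep UF x) (by have := mcard_lt hv hp; omega)

lemma root_key {UF : PySem.Dict Int Int} {h : Int → Nat} (hv : ValidW UF h) {x : Int}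
    (hx : UF.contains x = true) : UF.contains (rootD UF x) = true := by
  suffices H : ∀ (N : Nat) (x : Int), mcard UF h x ≤ N → UF.contains x = true →
      UF.contains (rootD UF x) = true by
    exact H (mcard UF h x) x le_rfl hx
  intro N
  induction N with
  | zero =>
    intro x hN hc
    by_cases hp : pstep UF x = x
    · rw [rootD_of_fix hp]; exact hc
    · have := mcard_lt hv hp; omega
  | succ N ih =>
    intro x hN hc
    by_cases hp : pstep UF x = x
    · rw [rootD_of_fix hp]; exact hc
    · rw [rootD_step hv hp]
      exact ih (pstep UF x) (by have := mcard_lt hv hp; omega)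
        (hv x _ (pstep_edge hp) hp).1

lemma h_root_lt {UF : PySem.Dict Int Int} {h : Int → Nat} (hv : ValidW UF h) {x : Int}
    (hx : rootD UF x ≠ x) : h (rootD UF x) < h x := by
  suffices H : ∀ (N : Nat) (x : Int), mcard UF h x ≤ N → rootD UF x ≠ x →
      h (rootD UF x) < h x by
    exact H (mcard UF h x) x le_rfl hx
  intro N
  induction N with
  | zero =>
    intro x hN hne
    by_cases hp : pstep UF x = x
    · exact absurd (rootD_of_fix hp) hne
    · have := mcard_lt hv hp; omega
  | succ N ih =>
    intro x hN hne
    by_cases hp : pstep UF x = x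
    · exact absurd (rootD_of_fix hp) hne
    · have hstep := rootD_step hv hp
      have hlt := (hv x _ (pstep_edge hp) hp).2
      by_cases hr : rootD UF (pstep UF x) = pstep UF x
      · rw [hstep, hr]; exact hlt
      · have := ih (pstep UF x) (by have := mcard_lt hv hp; omega) hr
        rw [hstep]; omega

def Valid (UF : PySem.Dict Int Int) : Prop := ∃ h, ValidW UF h

lemma pstep_insert (UF : PySem.Dict Int Int) (k v z : Int) :
    pstep (UF.insert k v) z = if z = k then v else pstep UF z := by
  simp only [pstep, PySem.Dict.getD_insert]

lemma root_insert_fresh {UF : PySem.Dict Int Int} {h : Int → Nat} (hv : ValidW UF h) {x : Int}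
    (hx : UF.contains x = false) :
    ValidW (UF.insert x x) h ∧ ∀ z, rootD (UF.insert x x) z = rootD UF z := by
  have hW : ValidW (UF.insert x x) h := by
    intro z p hget hne
    rw [PySem.Dict.get?_insert] at hget
    by_cases hz : z = x
    · simp [hz] at hget; omega
    · rw [if_neg hz] at hget
      obtain ⟨hc, hlt⟩ := hv z p hget hne
      exact ⟨by simp [PySem.Dict.contains_insert, hc], hlt⟩
  refine ⟨hW, ?_⟩
  apply root_eq_of hW (rootD UF)
  · intro z hz
    rw [pstep_insert] at hz
    by_cases hzx : z = x
    · subst hzx; exact rootD_nonkey hx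
    · rw [if_neg hzx] at hz; exact rootD_of_fix hz
  · intro z hz
    rw [pstep_insert] at hz ⊢
    by_cases hzx : z = x
    · subst hzx; simp at hz
    · rw [if_neg hzx] at hz ⊢
      exact rootD_step hv hz

lemma root_insert_compress {UF : PySem.Dict Int Int} {h : Int → Nat} (hv : ValidW UF h) {x : Int}
    (hx : UF.contains x = true) :
    ValidW (UF.insert x (rootD UF x)) h ∧
      ∀ z, rootD (UF.insert x (rootD UF x)) z = rootD UF z := by
  set r := rootD UF x with hr
  have hW : ValidW (UF.insert x r) h := by
    intro z p hget hne
    rw [PySem.Dict.get?_insert] at hget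
    by_cases hz : z = x
    · rw [if_pos hz] at hget
      injection hget with hpe
      subst hpe; subst hz
      have hrx : r ≠ z := hne
      have hck := root_key hv hx
      rw [← hr] at hck
      refine ⟨by simp [PySem.Dict.contains_insert, hck], h_root_lt hv hrx⟩
    · rw [if_neg hz] at hget
      obtain ⟨hc, hlt⟩ := hv z p hget hne
      exact ⟨by simp [PySem.Dict.contains_insert, hc], hlt⟩
  refine ⟨hW, ?_⟩
  apply root_eq_of hW (rootD UF)
  · intro z hz
    rw [pstep_insert] at hz
    by_cases hzx : z = x
    · subst hzx; rw [if_pos rfl] at hz; exact hr.symm.trans hz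
    · rw [if_neg hzx] at hz; exact rootD_of_fix hz
  · intro z hz
    rw [pstep_insert] at hz
    by_cases hzx : z = x
    · subst hzx
      rw [if_pos rfl] at hz
      rw [pstep_insert, if_pos rfl]
      have hfix : pstep UF r = r := rootD_fix hv z
      exact (rootD_of_fix hfix).symm
    · rw [if_neg hzx] at hz
      rw [pstep_insert, if_neg hzx]
      exact rootD_step hv hz

lemma root_insert_union {UF : PySem.Dict Int Int} {h : Int → Nat} (hv : ValidW UF h) {a b : Int}
    (hfa : pstep UF a = a) (hfb : pstep UF b = b) (hbk : UF.contains b = true) :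
    Valid (UF.insert a b) ∧
      ∀ z, rootD (UF.insert a b) z = if rootD UF z = a then b else rootD UF z := by
  have hra : rootD UF a = a := rootD_of_fix hfa
  have hrb : rootD UF b = b := rootD_of_fix hfb
  set h' : Int → Nat := fun z => if rootD UF z = a then h z + h b + 1 else h z with hh'
  have hW : ValidW (UF.insert a b) h' := by
    intro z p hget hne
    rw [PySem.Dict.get?_insert] at hget
    by_cases hz : z = a
    · rw [if_pos hz] at hget
      injection hget with hpe
      subst hpe; subst hz
      refine ⟨by simp [PySem.Dict.contains_insert, hbk], ?_⟩
      simp only [hh']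
      simp [hra, hrb, hne]
    · rw [if_neg hz] at hget
      obtain ⟨hc, hlt⟩ := hv z p hget hne
      refine ⟨by simp [PySem.Dict.contains_insert, hc], ?_⟩
      have hps : pstep UF z = p := by
        simp [pstep, PySem.Dict.getD_eq_get?_getD, hget]
      have hrzp : rootD UF z = rootD UF p := by
        rw [← hps]; exact rootD_step hv (by rw [hps]; exact fun hc2 => hne (hc2 ▸ rfl))
      simp only [hh', hrzp]
      split_ifs <;> omega
  refine ⟨⟨h', hW⟩, ?_⟩
  apply root_eq_of hW (fun z => if rootD UF z = a then b else rootD UF z)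
  · intro z hz
    rw [pstep_insert] at hz
    by_cases hza : z = a
    · subst hza
      rw [if_pos rfl] at hz
      simp [hra, hz]
    · rw [if_neg hza] at hz
      rw [rootD_of_fix hz, if_neg hza]
  · intro z hz
    rw [pstep_insert] at hz
    by_cases hza : z = a
    · subst hza
      rw [if_pos rfl] at hz
      rw [pstep_insert, if_pos rfl]
      simp [hra, hrb, hz]
    · rw [if_neg hza] at hz
      rw [pstep_insert, if_neg hza, rootD_step hv hz]

lemma findA_spec {h : Int → Nat} :
    ∀ (f : Nat) (UF : PySem.Dict Int Int) (x : Int), ValidW UF h → mcard UF h x < f →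
      Valid (findA f UF x).1 ∧
      (∀ z, rootD (findA f UF x).1 z = rootD UF z) ∧
      (findA f UF x).2 = rootD UF x ∧
      (∀ z, (findA f UF x).1.contains z = (UF.contains z || z == x)) := by
  intro f
  induction f with
  | zero => intro UF x hv hm; omega
  | succ f ih =>
    intro UF x hv hm
    by_cases hc : UF.contains x = true
    · by_cases hp : pstep UF x = x
      · have heq : findA (f+1) UF x = (UF, x) := by
          simp only [findA, hc, if_true]
          rw [show UF.getD x x = x from hp]
          rw [if_neg (show ¬ x ≠ x from by simp)]
        rw [heq]
        refine ⟨⟨h, hv⟩, fun z => rfl, (rootD_of_fix hp).symm, fun z => ?_⟩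
        by_cases hzx : z = x
        · subst hzx; simp [hc]
        · simp [hzx]
      · have hgd : UF.getD x x = pstep UF x := rfl
        have heq : findA (f+1) UF x =
            ((findA f UF (pstep UF x)).1.insert x (findA f UF (pstep UF x)).2,
              (findA f UF (pstep UF x)).2) := by
          simp only [findA, hc, if_true, hgd]
          rw [if_pos (show x ≠ pstep UF x from fun e => hp e.symm)]
        have hmp : mcard UF h (pstep UF x) < f := by
          have := mcard_lt hv hp; omega
        obtain ⟨⟨h2, hv2⟩, hroots, hres, hcont⟩ := ih UF (pstep UF x) hv hmp
        have hcp : UF.contains (pstep UF x) = true := (hv x _ (pstep_edge hp) hp).1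
        have hcx1 : (findA f UF (pstep UF x)).1.contains x = true := by
          rw [hcont x, hc]; rfl
        have hrx1 : rootD (findA f UF (pstep UF x)).1 x = rootD UF x := hroots x
        have hres' : (findA f UF (pstep UF x)).2 = rootD (findA f UF (pstep UF x)).1 x := by
          rw [hres, hrx1, rootD_step hv hp]
        obtain ⟨hW3, hroots3⟩ := root_insert_compress hv2 hcx1
        rw [heq]
        refine ⟨⟨h2, by rw [hres']; exact hW3⟩, ?_, ?_, ?_⟩
        · intro z
          rw [hres']
          rw [hroots3 z, hroots z]
        · rw [hres, rootD_step hv hp]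
        · intro z
          rw [hres']
          rw [PySem.Dict.contains_insert]
          rw [hcont z]
          by_cases hzx : z = x
          · subst hzx; simp [hc]
          · by_cases hzp : z = pstep UF x
            · subst hzp; simp [hcp]
            · rw [show (z == pstep UF x) = false by simp [hzp],
                   show (z == x) = false by simp [hzx]]
              simp
    · have hcf : UF.contains x = false := by simpa using hc
      have heq : findA (f+1) UF x = (UF.insert x x, x) := by
        simp only [findA, hcf, Bool.false_eq_true, if_false]
        rw [PySem.Dict.getD_insert_self]
        rw [if_neg (show ¬ x ≠ x from by simp)]
      rw [heq]
      obtain ⟨hW, hroots⟩ := root_insert_fresh hv hcf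
      refine ⟨⟨h, hW⟩, hroots, (rootD_nonkey hcf).symm, fun z => ?_⟩
      rw [PySem.Dict.contains_insert, Bool.or_comm]

lemma findTop_spec {UF : PySem.Dict Int Int} (hv : Valid UF) (x : Int) :
    Valid (findTop UF x).1 ∧
    (∀ z, rootD (findTop UF x).1 z = rootD UF z) ∧
    (findTop UF x).2 = rootD UF x ∧
    (∀ z, (findTop UF x).1.contains z = (UF.contains z || z == x)) := by
  obtain ⟨h, hv⟩ := hv
  exact findA_spec (UF.size + 1) UF x hv (by have := mcard_le_size UF h x; omega)

lemma unionA_spec {UF : PySem.Dict Int Int} (hv : Valid UF) (x y : Int) :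
    Valid (unionA UF x y) ∧
    (∀ z, rootD (unionA UF x y) z = if rootD UF z = rootD UF x then rootD UF y else rootD UF z) := by
  obtain ⟨hv1, hroots1, hres1, hcont1⟩ := findTop_spec hv x
  obtain ⟨hv2, hroots2, hres2, hcont2⟩ := findTop_spec hv1 y
  obtain ⟨h2, hW2⟩ := hv2
  set UF1 := (findTop UF x).1
  set UF2 := (findTop UF1 y).1
  have hra : (findTop UF x).2 = rootD UF2 x := by
    rw [hres1, ← hroots1 x, ← hroots2 x]
  have hrb : (findTop UF1 y).2 = rootD UF2 y := by
    rw [hres2, ← hroots2 y]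
  have hfa : pstep UF2 (findTop UF x).2 = (findTop UF x).2 := by
    rw [hra]; exact rootD_fix hW2 x
  have hfb : pstep UF2 (findTop UF1 y).2 = (findTop UF1 y).2 := by
    rw [hrb]; exact rootD_fix hW2 y
  have hcy : UF2.contains y = true := by rw [hcont2 y]; simp
  have hbk : UF2.contains (findTop UF1 y).2 = true := by
    rw [hrb]; exact root_key hW2 hcy
  obtain ⟨hv3, hroots3⟩ := root_insert_union hW2 hfa hfb hbk
  have hroots2' : ∀ z, rootD UF2 z = rootD UF z := fun z => by rw [hroots2 z, hroots1 z]
  refine ⟨hv3, fun z => ?_⟩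
  show rootD (UF2.insert (findTop UF x).2 (findTop UF1 y).2) z = _
  rw [hroots3 z, hroots2' z, hra, hrb, hroots2' x, hroots2' y]

lemma rootD_empty (x : Int) : rootD PySem.Dict.empty x = x :=
  rootD_nonkey (by simp [PySem.Dict.contains_empty])

-- ---- A's loop maintains: equal roots ↔ equivalence closure of the unions so far ----
def GoodA (UF : PySem.Dict Int Int) (Q : Int → Int → Prop) : Prop :=
  Valid UF ∧ ∀ x y, rootD UF x = rootD UF y ↔ Q x y

lemma eqvGen_congr {R S : Int → Int → Prop} (h : ∀ u w, R u w ↔ S u w) (x y : Int) :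
    Relation.EqvGen R x y ↔ Relation.EqvGen S x y :=
  ⟨Relation.EqvGen.mono (fun a b hab => (h a b).mp hab),
   Relation.EqvGen.mono (fun a b hab => (h a b).mpr hab)⟩

lemma goodA_congr {UF : PySem.Dict Int Int} {Q Q' : Int → Int → Prop}
    (hg : GoodA UF Q) (h : ∀ x y, Q x y ↔ Q' x y) : GoodA UF Q' :=
  ⟨hg.1, fun x y => (hg.2 x y).trans (h x y)⟩

lemma union_invA {UF : PySem.Dict Int Int} {R : Int → Int → Prop}
    (hg : GoodA UF (Relation.EqvGen R)) (a b : Int) :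
    GoodA (unionA UF a b) (Relation.EqvGen (fun u w => R u w ∨ (u = a ∧ w = b))) := by
  obtain ⟨hv, hiff⟩ := hg
  obtain ⟨hv', hroots⟩ := unionA_spec hv a b
  have lift : ∀ u w, Relation.EqvGen R u w →
      Relation.EqvGen (fun u w => R u w ∨ (u = a ∧ w = b)) u w :=
    fun u w => Relation.EqvGen.mono (fun p q h => Or.inl h)
  have pab : Relation.EqvGen (fun u w => R u w ∨ (u = a ∧ w = b)) a b :=
    Relation.EqvGen.rel _ _ (Or.inr ⟨rfl, rfl⟩)
  refine ⟨hv', fun x y => ?_⟩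
  rw [hroots x, hroots y]
  constructor
  · intro heq
    by_cases h1 : rootD UF x = rootD UF a <;> by_cases h2 : rootD UF y = rootD UF a
    · exact (lift _ _ ((hiff x a).mp h1)).trans _ _ _
        ((lift _ _ ((hiff y a).mp h2)).symm _ _)
    · rw [if_pos h1, if_neg h2] at heq
      have hxa := (hiff x a).mp h1
      have hby := (hiff b y).mp heq
      exact ((lift _ _ hxa).trans _ _ _ pab).trans _ _ _ (lift _ _ hby)
    · rw [if_neg h1, if_pos h2] at heq
      have hxb := (hiff x b).mp heq
      have hya := (hiff y a).mp h2
      exact ((lift _ _ hxb).trans _ _ _ (pab.symm _ _)).trans _ _ _ ((lift _ _ hya).symm _ _)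
    · rw [if_neg h1, if_neg h2] at heq
      exact lift _ _ ((hiff x y).mp heq)
  · intro h'
    induction h' with
    | rel u w h =>
      rcases h with h | ⟨hu, hw⟩
      · have := (hiff u w).mpr (Relation.EqvGen.rel _ _ h)
        rw [this]
      · rw [hu, hw, if_pos rfl]
        by_cases hb : rootD UF b = rootD UF a <;> simp [hb]
    | refl u => rfl
    | symm u w _ ih => exact ih.symm
    | trans u w z _ _ ih1 ih2 => exact ih1.trans ih2

lemma while_invA {n num : Int} (hnum : 1 ≤ num) :
    ∀ (fuel : Nat) (mul : Int) (UF : PySem.Dict Int Int) (R : Int → Int → Prop),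
      GoodA UF (Relation.EqvGen R) → n < num * (mul + fuel) →
      GoodA (whileA n num fuel mul UF)
        (Relation.EqvGen (fun u w => R u w ∨
          (u = num ∧ ∃ m : Int, mul ≤ m ∧ w = num * m ∧ w ≤ n))) := by
  intro fuel
  induction fuel with
  | zero =>
    intro mul UF R hg hb
    have hb' : n < num * mul := by simpa using hb
    refine goodA_congr hg (fun x y => eqvGen_congr (fun u w => ?_) x y)
    constructor
    · exact fun h => Or.inl h
    · rintro (h | ⟨hu, m, hm, hw, hwn⟩)
      · exact h
      · exfalso
        have : num * mul ≤ num * m := by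
          apply Int.mul_le_mul_of_nonneg_left hm (by omega)
        omega
  | succ f ih =>
    intro mul UF R hg hb
    by_cases hc : num * mul ≤ n
    · have hstep := union_invA hg num (num * mul)
      have hb' : n < num * ((mul + 1) + (f : Int)) := by
        have : ((f + 1 : Nat) : Int) = (f : Int) + 1 := by push_cast; ring
        rw [this] at hb
        have : num * (mul + ((f : Int) + 1)) = num * ((mul + 1) + (f : Int)) := by ring
        omega
      have := ih (mul + 1) (unionA UF num (num * mul)) _ hstep hb'
      rw [show whileA n num (f + 1) mul UF
            = whileA n num f (mul + 1) (unionA UF num (num * mul)) by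
          simp only [whileA, if_pos hc]]
      refine goodA_congr this (fun x y => eqvGen_congr (fun u w => ?_) x y)
      constructor
      · rintro ((h | ⟨hu, hw⟩) | ⟨hu, m, hm, hw, hwn⟩)
        · exact Or.inl h
        · exact Or.inr ⟨hu, mul, le_refl _, hw, by omega⟩
        · exact Or.inr ⟨hu, m, by omega, hw, hwn⟩
      · rintro (h | ⟨hu, m, hm, hw, hwn⟩)
        · exact Or.inl (Or.inl h)
        · by_cases hmm : m = mul
          · subst hmm; exact Or.inl (Or.inr ⟨hu, hw⟩)
          · exact Or.inr ⟨hu, m, by omega, hw, hwn⟩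
    · rw [show whileA n num (f + 1) mul UF = UF by simp only [whileA, if_neg hc]]
      refine goodA_congr hg (fun x y => eqvGen_congr (fun u w => ?_) x y)
      constructor
      · exact fun h => Or.inl h
      · rintro (h | ⟨hu, m, hm, hw, hwn⟩)
        · exact h
        · exfalso
          have : num * mul ≤ num * m := by
            apply Int.mul_le_mul_of_nonneg_left hm (by omega)
          omega

lemma outer_invA {n : Int} :
    ∀ (l : List Int) (UF : PySem.Dict Int Int) (R : Int → Int → Prop),
      (∀ x ∈ l, 1 ≤ x) → GoodA UF (Relation.EqvGen R) →
      GoodA (l.foldl (outerA n) UF)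
        (Relation.EqvGen (fun u w => R u w ∨
          (u ∈ l ∧ ∃ m : Int, 2 ≤ m ∧ w = u * m ∧ w ≤ n))) := by
  intro l
  induction l with
  | nil =>
    intro UF R _ hg
    refine goodA_congr hg (fun x y => eqvGen_congr (fun u w => ?_) x y)
    simp
  | cons x l ih =>
    intro UF R hmem hg
    have hx1 : 1 ≤ x := hmem x List.mem_cons_self
    have hb : n < x * (2 + ((n.toNat + 1 : Nat) : Int)) := by
      have h1 : (n : Int) ≤ (n.toNat : Int) := Int.self_le_toNat n
      push_cast
      nlinarith
    have hstep := while_invA hx1 (n.toNat + 1) 2 UF R hg hb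
    simp only [List.foldl_cons]
    have := ih (outerA n UF x) _ (fun y hy => hmem y (List.mem_cons_of_mem _ hy)) hstep
    refine goodA_congr this (fun a b => eqvGen_congr (fun u w => ?_) a b)
    constructor
    · rintro ((h | ⟨hu, m, hm, hw, hwn⟩) | ⟨hu, m, hm, hw, hwn⟩)
      · exact Or.inl h
      · exact Or.inr ⟨by rw [hu]; exact List.mem_cons_self, m, hm, by rw [hu]; exact hw, hwn⟩
      · exact Or.inr ⟨List.mem_cons_of_mem _ hu, m, hm, hw, hwn⟩
    · rintro (h | ⟨hu, m, hm, hw, hwn⟩)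
      · exact Or.inl (Or.inl h)
      · rcases List.mem_cons.mp hu with he | hl
        · exact Or.inl (Or.inr ⟨he, m, hm, by rw [← he]; exact hw, hwn⟩)
        · exact Or.inr ⟨hl, m, hm, hw, hwn⟩

lemma init_goodA : GoodA PySem.Dict.empty (Relation.EqvGen (fun _ _ => False)) := by
  refine ⟨⟨fun _ => 0, fun x p hget _ => by simp [PySem.Dict.get?_empty] at hget⟩, fun x y => ?_⟩
  rw [rootD_empty, rootD_empty]
  constructor
  · rintro rfl; exact Relation.EqvGen.refl x
  · intro h
    induction h with
    | rel u w h => exact absurd h (by simp)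
    | refl u => rfl
    | symm u w _ ih => exact ih.symm
    | trans u w z _ _ ih1 ih2 => exact ih1.trans ih2

lemma finalA_good {n t : Int} (hPre : 0 ≤ t ∨ n ≤ t) :
    GoodA ((PySem.List.pyRange (t + 1) (n + 1) 1).foldl (outerA n) PySem.Dict.empty)
      (Relation.EqvGen (EdgeR n t)) := by
  have H := @outer_invA n (PySem.List.pyRange (t + 1) (n + 1) 1) PySem.Dict.empty
    (fun _ _ => False)
    (fun x hx => by
      rw [PySem.List.mem_pyRange_one] at hx
      omega)
    init_goodA
  refine goodA_congr H (fun a b => eqvGen_congr (fun u w => ?_) a b)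
  rw [PySem.List.mem_pyRange_one]
  unfold EdgeR
  constructor
  · rintro (h | ⟨⟨h1, h2⟩, m, hm⟩)
    · exact absurd h (by simp)
    · exact ⟨h1, by omega, m, hm⟩
  · rintro ⟨h1, h2, m, hm⟩
    exact Or.inr ⟨⟨h1, by omega⟩, m, hm⟩

lemma rtg_symm {S : Int → Int → Prop} (hs : ∀ a b, S a b → S b a) {x y : Int}
    (h : Relation.ReflTransGen S x y) : Relation.ReflTransGen S y x := by
  induction h with
  | refl => exact Relation.ReflTransGen.refl
  | tail _ hstep ih =>
    exact Relation.ReflTransGen.trans (Relation.ReflTransGen.single (hs _ _ hstep)) ih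

lemma eqvGen_iff_rtg {R : Int → Int → Prop} (x y : Int) :
    Relation.EqvGen R x y ↔ Relation.ReflTransGen (fun a b => R a b ∨ R b a) x y := by
  constructor
  · intro h
    induction h with
    | rel u w h => exact Relation.ReflTransGen.single (Or.inl h)
    | refl u => exact Relation.ReflTransGen.refl
    | symm u w _ ih => exact rtg_symm (fun a b hab => hab.symm) ih
    | trans u w z _ _ ih1 ih2 => exact ih1.trans ih2
  · intro h
    induction h with
    | refl => exact Relation.EqvGen.refl x
    | tail _ hstep ih =>
      rcases hstep with h' | h'
      · exact ih.trans _ _ _ (Relation.EqvGen.rel _ _ h')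
      · exact ih.trans _ _ _ ((Relation.EqvGen.rel _ _ h').symm _ _)

lemma query_sim {lab : Int → Int} :
    ∀ (qs : List (List Int)) (UF : PySem.Dict Int Int) (acc : List Bool),
      Valid UF → (∀ x y : Int, rootD UF x = rootD UF y ↔ lab x = lab y) →
      (qs.foldl qstepA (UF, acc)).2 =
        acc ++ qs.map (fun q =>
          decide (lab (PySem.List.pyGetD q 0 0) = lab (PySem.List.pyGetD q 1 0))) := by
  intro qs
  induction qs with
  | nil => intro UF acc _ _; simp
  | cons q qs ih =>
    intro UF acc hv hiff
    simp only [List.foldl_cons, List.map_cons]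
    obtain ⟨hv1, hroots1, hres1, _⟩ := findTop_spec hv (PySem.List.pyGetD q 0 0)
    obtain ⟨hv2, hroots2, hres2, _⟩ := findTop_spec hv1 (PySem.List.pyGetD q 1 0)
    have hdec : (decide ((findTop UF (PySem.List.pyGetD q 0 0)).2
        = (findTop (findTop UF (PySem.List.pyGetD q 0 0)).1 (PySem.List.pyGetD q 1 0)).2))
        = decide (lab (PySem.List.pyGetD q 0 0) = lab (PySem.List.pyGetD q 1 0)) := by
      apply decide_eq_decide.mpr
      rw [hres1, hres2, hroots1]
      exact hiff _ _
    have hiff' : ∀ x y : Int,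
        rootD (findTop (findTop UF (PySem.List.pyGetD q 0 0)).1 (PySem.List.pyGetD q 1 0)).1 x
          = rootD (findTop (findTop UF (PySem.List.pyGetD q 0 0)).1 (PySem.List.pyGetD q 1 0)).1 y
          ↔ lab x = lab y := by
      intro x y
      rw [hroots2, hroots2, hroots1, hroots1]
      exact hiff x y
    have := ih (findTop (findTop UF (PySem.List.pyGetD q 0 0)).1 (PySem.List.pyGetD q 1 0)).1
      (acc ++ [decide ((findTop UF (PySem.List.pyGetD q 0 0)).2
        = (findTop (findTop UF (PySem.List.pyGetD q 0 0)).1 (PySem.List.pyGetD q 1 0)).2)])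
      hv2 hiff'
    rw [show qstepA (UF, acc) q
        = ((findTop (findTop UF (PySem.List.pyGetD q 0 0)).1 (PySem.List.pyGetD q 1 0)).1,
            acc ++ [decide ((findTop UF (PySem.List.pyGetD q 0 0)).2
              = (findTop (findTop UF (PySem.List.pyGetD q 0 0)).1 (PySem.List.pyGetD q 1 0)).2)])
        from rfl]
    rw [this, hdec]
    simp

-- ---- B-side: characterizing the on-demand neighbour lists ----
lemma divLoop_spec (t x : Int) :
    ∀ (fuel : Nat) (i : Int), 1 ≤ i → x + 1 ≤ i + fuel →
      ∀ z, z ∈ divLoop t x fuel i ↔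
        ∃ j : Int, i ≤ j ∧ j * j ≤ x ∧ PySem.Int.mod x j = 0 ∧
          (z = j ∨ z = PySem.Int.floordiv x j) ∧ t < z ∧ z ≤ PySem.Int.floordiv x 2 := by
  intro fuel
  induction fuel with
  | zero =>
    intro i hi hb z
    simp only [divLoop, List.not_mem_nil, false_iff]
    rintro ⟨j, hij, hjj, -, -, -, -⟩
    have hjq : j ≤ j * j := le_mul_of_one_le_left (by omega) (by omega)
    simp only [Nat.cast_zero] at hb
    omega
  | succ f ih =>
    intro i hi hb z
    by_cases hii : i * i ≤ x
    · have hrec := ih (i + 1) (by omega) (by push_cast at hb ⊢; omega) z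
      simp only [divLoop, if_pos hii, List.mem_append]
      rw [hrec]
      constructor
      · rintro (hz | ⟨j, hij, hjj, hmod, hzj, htz, hz2⟩)
        · by_cases hm : PySem.Int.mod x i == 0
          · rw [if_pos hm] at hz
            rw [List.mem_append] at hz
            rcases hz with hz | hz
            · split_ifs at hz with hcond
              · rw [List.mem_singleton] at hz
                exact ⟨i, le_refl _, hii, by simpa using hm, Or.inl hz,
                  by omega, by omega⟩
              · simp at hz
            · split_ifs at hz with hcond
              · rw [List.mem_singleton] at hz
                exact ⟨i, le_refl _, hii, by simpa using hm, Or.inr hz,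
                  by omega, by omega⟩
              · simp at hz
          · rw [if_neg hm] at hz; simp at hz
        · exact ⟨j, by omega, hjj, hmod, hzj, htz, hz2⟩
      · rintro ⟨j, hij, hjj, hmod, hzj, htz, hz2⟩
        by_cases hji : j = i
        · subst hji
          left
          rw [if_pos (by simpa using hmod)]
          rw [List.mem_append]
          rcases hzj with hz | hz
          · left; rw [if_pos (by omega : t < j ∧ j ≤ PySem.Int.floordiv x 2)]
            simp [hz]
          · right
            rw [if_pos (show t < PySem.Int.floordiv x j ∧
                PySem.Int.floordiv x j ≤ PySem.Int.floordiv x 2 by omega)]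
            simp [hz]
        · right; exact ⟨j, by omega, hjj, hmod, hzj, htz, hz2⟩
    · simp only [divLoop, if_neg hii, List.not_mem_nil, false_iff]
      rintro ⟨j, hij, hjj, -, -, -, -⟩
      have : i * i ≤ j * j := mul_le_mul hij hij (by omega) (by omega)
      omega

lemma edge_bounds {n t u w : Int} (hPre : 0 ≤ t ∨ n ≤ t) (h : EdgeR n t u w) :
    1 ≤ u ∧ u ≤ n ∧ 2 ≤ w ∧ w ≤ n := by
  obtain ⟨h1, h2, m, hm, hw, hwn⟩ := h
  have hu1 : 1 ≤ u := by omega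
  refine ⟨hu1, h2, ?_, hwn⟩
  nlinarith

lemma se_bounds {n t x y : Int} (hPre : 0 ≤ t ∨ n ≤ t) (h : SE n t x y) :
    (1 ≤ x ∧ x ≤ n) ∧ (1 ≤ y ∧ y ≤ n) := by
  rcases h with h | h <;> have := edge_bounds hPre h <;>
    exact ⟨by omega, by omega⟩

lemma se_symm {n t x y : Int} (h : SE n t x y) : SE n t y x := h.symm

lemma reach_symm {n t x y : Int} (h : Reach n t x y) : Reach n t y x :=
  rtg_symm (fun _ _ hab => se_symm hab) h

lemma reach_bounds {n t v y : Int} (hPre : 0 ≤ t ∨ n ≤ t) (hv : 1 ≤ v ∧ v ≤ n)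
    (h : Reach n t v y) : 1 ≤ y ∧ y ≤ n := by
  induction h with
  | refl => exact hv
  | tail _ hstep ih => exact (se_bounds hPre hstep).2

lemma reach_out {n t x y : Int} (hPre : 0 ≤ t ∨ n ≤ t) (hx : ¬ (1 ≤ x ∧ x ≤ n))
    (h : Reach n t x y) : y = x := by
  induction h with
  | refl => rfl
  | tail _ hstep ih =>
    exact absurd ((se_bounds hPre (ih ▸ hstep)).1) hx

lemma mem_nbrsB {n t : Int} (hPre : 0 ≤ t ∨ n ≤ t) (x z : Int) :
    z ∈ nbrsB n t x ↔ SE n t x z := by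
  unfold nbrsB
  rw [List.mem_append]
  have hmul : (z ∈ if t < x ∧ x ≤ n then PySem.List.pyRange (2 * x) (n + 1) x else [])
      ↔ EdgeR n t x z := by
    split_ifs with hcond
    · have hx1 : 1 ≤ x := by omega
      rw [PySem.List.mem_pyRange_iff_of_pos (by omega)]
      constructor
      · rintro ⟨h1, h2, c, hc⟩
        have hc0 : 0 ≤ c := by nlinarith
        exact ⟨by omega, by omega, 2 + c, by omega, by linarith [hc], by omega⟩
      · rintro ⟨h1, h2, m, hm, hz, hzn⟩
        refine ⟨by nlinarith, by omega, m - 2, by rw [hz]; ring⟩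
    · simp only [List.not_mem_nil, false_iff]
      rintro ⟨h1, h2, -⟩
      omega
  have hdiv : (z ∈ if 1 ≤ x ∧ x ≤ n then divLoop t x (x.toNat + 1) 1 else [])
      ↔ EdgeR n t z x := by
    split_ifs with hcond
    · obtain ⟨hx1, hxn⟩ := hcond
      rw [divLoop_spec t x (x.toNat + 1) 1 (by omega) (by omega) z]
      have hfd2 : PySem.Int.floordiv x 2 = x / 2 :=
        PySem.Int.floordiv_eq_ediv_of_pos (by omega)
      constructor
      · rintro ⟨j, hj1, hjj, hmod, hzj, htz, hz2⟩
        have hjdvd : j ∣ x := (PySem.Int.mod_eq_zero_iff_dvd x j).mp hmod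
        have hfdj : PySem.Int.floordiv x j = x / j :=
          PySem.Int.floordiv_eq_ediv_of_pos (by omega)
        have h2z : 2 * z ≤ x := by
          rw [hfd2] at hz2
          have := (Int.le_ediv_iff_mul_le (by omega : (0:Int) < 2)).mp hz2
          omega
        rcases hzj with hz | hz
        · subst hz
          refine ⟨by omega, ?_, x / z, ?_, ?_, hxn⟩
          · nlinarith
          · rw [Int.le_ediv_iff_mul_le (by omega)]; omega
          · rw [mul_comm]
            exact (Int.ediv_mul_cancel hjdvd).symm
        · rw [hfdj] at hz
          subst hz
          refine ⟨by omega, ?_, j, ?_, ?_, hxn⟩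
          · calc x / j ≤ x := Int.ediv_le_self _ (by omega)
              _ ≤ n := hxn
          · by_cases hj2 : 2 ≤ j
            · exact hj2
            · exfalso
              have hj1' : j = 1 := by omega
              subst hj1'
              simp only [Int.ediv_one] at htz hz2
              rw [hfd2] at hz2
              have := Int.ediv_le_self 2 (by omega : (0:Int) ≤ x)
              omega
          · exact (Int.ediv_mul_cancel hjdvd).symm
      · rintro ⟨htz, hzn, m, hm, hx, hxn'⟩
        have hz1 : 1 ≤ z := by omega
        have h2z : 2 * z ≤ x := by nlinarith
        have hz2 : z ≤ PySem.Int.floordiv x 2 := by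
          rw [hfd2, Int.le_ediv_iff_mul_le (by omega : (0:Int) < 2)]
          omega
        by_cases hzz : z * z ≤ x
        · refine ⟨z, by omega, hzz, ?_, Or.inl rfl, htz, hz2⟩
          rw [PySem.Int.mod_eq_zero_iff_dvd]
          exact ⟨m, hx⟩
        · refine ⟨m, by omega, by nlinarith, ?_, Or.inr ?_, htz, hz2⟩
          · rw [PySem.Int.mod_eq_zero_iff_dvd]
            exact ⟨z, by rw [hx]; ring⟩
          · rw [PySem.Int.floordiv_eq_ediv_of_pos (by omega : (0:Int) < m), hx,
              Int.mul_ediv_cancel z (by omega)]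
    · simp only [List.not_mem_nil, false_iff]
      rintro h
      have := edge_bounds hPre h
      omega
  rw [hmul, hdiv]
  rfl

-- ---- dict bookkeeping for the BFS flood ----
lemma dict_size_keys (d : PySem.Dict Int Int) : d.size = d.keys.length := by
  simp [PySem.Dict.keys, PySem.Dict.size]

lemma dict_size_le {d : PySem.Dict Int Int} {n : Int} (hnd : d.keys.Nodup)
    (hb : ∀ k, d.contains k = true → 1 ≤ k ∧ k ≤ n) : d.size ≤ n.toNat := by
  rw [dict_size_keys]
  have hsub : d.keys.toFinset ⊆ (PySem.List.pyRange 1 (n + 1) 1).toFinset := by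
    intro k hk
    rw [List.mem_toFinset] at hk ⊢
    rw [PySem.List.mem_pyRange_one]
    have := hb k ((PySem.Dict.contains_iff_mem_keys d k).mpr hk)
    omega
  calc d.keys.length = d.keys.toFinset.card := (List.toFinset_card_of_nodup hnd).symm
    _ ≤ (PySem.List.pyRange 1 (n + 1) 1).toFinset.card := Finset.card_le_card hsub
    _ ≤ (PySem.List.pyRange 1 (n + 1) 1).length := List.toFinset_card_le _
    _ = n.toNat := by rw [PySem.List.length_pyRange_one]; omega

lemma dict_size_lt {d d' : PySem.Dict Int Int} (hnd : d.keys.Nodup) (hnd' : d'.keys.Nodup)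
    (hsub : ∀ z, d.contains z = true → d'.contains z = true) {w : Int}
    (hw : d'.contains w = true) (hnw : d.contains w = false) : d.size < d'.size := by
  rw [dict_size_keys, dict_size_keys]
  rw [← List.toFinset_card_of_nodup hnd, ← List.toFinset_card_of_nodup hnd']
  apply Finset.card_lt_card
  constructor
  · intro k hk
    rw [List.mem_toFinset] at hk ⊢
    exact (PySem.Dict.contains_iff_mem_keys _ _).mp
      (hsub k ((PySem.Dict.contains_iff_mem_keys _ _).mpr hk))
  · intro hss
    have : w ∈ d.keys.toFinset := hss (by
      rw [List.mem_toFinset]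
      exact (PySem.Dict.contains_iff_mem_keys _ _).mp hw)
    rw [List.mem_toFinset] at this
    rw [(PySem.Dict.contains_iff_mem_keys d w).mpr this] at hnw
    exact absurd hnw (by simp)

-- ---- the inner loop over one neighbour list ----
lemma addY_foldl (v : Int) :
    ∀ (l : List Int) (st : PySem.Dict Int Int × List Int),
      (∀ z ∈ st.2, st.1.contains z = true) → st.1.keys.Nodup →
      (∀ z, st.1.contains z = true → (l.foldl (addY v) st).1.get? z = st.1.get? z) ∧
      (∀ z, (l.foldl (addY v) st).1.contains z = true ↔ (st.1.contains z = true ∨ z ∈ l)) ∧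
      (∀ z, st.1.contains z = false → (l.foldl (addY v) st).1.contains z = true →
        (l.foldl (addY v) st).1.get? z = some v) ∧
      (∀ z, z ∈ (l.foldl (addY v) st).2 ↔ (z ∈ st.2 ∨ (st.1.contains z = false ∧ z ∈ l))) ∧
      (∀ z ∈ (l.foldl (addY v) st).2, (l.foldl (addY v) st).1.contains z = true) ∧
      (l.foldl (addY v) st).1.keys.Nodup := by
  intro l
  induction l with
  | nil =>
    intro st hst hnd
    refine ⟨fun z _ => rfl, fun z => by simp, fun z h1 h2 => ?_, fun z => by simp, hst, hnd⟩
    simp only [List.foldl_nil] at h2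
    rw [h1] at h2
    simp at h2
  | cons y l ih =>
    intro st hst hnd
    by_cases hc : st.1.contains y = true
    · have hstep : addY v st y = st := by simp [addY, hc]
      simp only [List.foldl_cons, hstep]
      obtain ⟨c1, c2, c3, c4, c5, c6⟩ := ih st hst hnd
      refine ⟨c1, fun z => ?_, c3, fun z => ?_, c5, c6⟩
      · rw [c2 z, List.mem_cons]
        by_cases hz : z = y
        · subst hz; simp [hc]
        · simp [hz]
      · rw [c4 z, List.mem_cons]
        by_cases hz : z = y
        · subst hz; simp [hc]
        · simp [hz]
    · have hcf : st.1.contains y = false := by simpa using hc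
      have hstep : addY v st y = (st.1.insert y v, st.2 ++ [y]) := by simp [addY, hcf]
      simp only [List.foldl_cons, hstep]
      have hst1 : ∀ z ∈ st.2 ++ [y], (st.1.insert y v).contains z = true := by
        intro z hz
        rw [List.mem_append, List.mem_singleton] at hz
        rw [PySem.Dict.contains_insert]
        rcases hz with hz | hz
        · rw [hst z hz]; simp
        · subst hz; simp
      obtain ⟨c1, c2, c3, c4, c5, c6⟩ := ih (st.1.insert y v, st.2 ++ [y]) hst1
        (PySem.Dict.nodup_keys_insert _ _ _ hnd)
      refine ⟨fun z hz => ?_, fun z => ?_, fun z h1 h2 => ?_, fun z => ?_, c5, c6⟩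
      · have hzy : z ≠ y := fun he => by rw [he, hcf] at hz; simp at hz
        rw [c1 z (by rw [PySem.Dict.contains_insert, hz]; simp)]
        simp only [PySem.Dict.get?_insert, if_neg hzy]
      · rw [c2 z]
        simp only [PySem.Dict.contains_insert, List.mem_cons]
        by_cases hz : z = y
        · subst hz; simp
        · rw [show (z == y) = false by simp [hz]]
          simp [hz]
      · by_cases hz : z = y
        · subst hz
          rw [c1 z (by rw [PySem.Dict.contains_insert]; simp)]
          rw [PySem.Dict.get?_insert, if_pos rfl]
        · apply c3 z
          · simp only [PySem.Dict.contains_insert, h1]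
            rw [show (z == y) = false by simp [hz]]
            rfl
          · exact h2
      · rw [c4 z]
        simp only [List.mem_append, PySem.Dict.contains_insert, List.mem_cons,
          List.not_mem_nil, or_false]
        by_cases hz : z = y
        · have hznot : z ∉ st.2 := fun hm => by
            rw [hz] at hm; rw [hst y hm] at hcf; simp at hcf
          constructor
          · intro _; exact Or.inr ⟨by rw [hz]; exact hcf, Or.inl hz⟩
          · intro _; exact Or.inl (Or.inr hz)
        · rw [show (z == y) = false by simp [hz]]
          simp only [Bool.false_or]
          constructor
          · rintro ((h | h) | ⟨h1, h2⟩)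
            · exact Or.inl h
            · exact absurd h hz
            · exact Or.inr ⟨by simpa using h1, Or.inr h2⟩
          · rintro (h | ⟨h1, h2 | h2⟩)
            · exact Or.inl (Or.inl h)
            · exact absurd h2 hz
            · exact Or.inr ⟨by simpa using h1, h2⟩

lemma exists_cons_iff {p : Int → Prop} {x : Int} {F : List Int} :
    (∃ a ∈ x :: F, p a) ↔ p x ∨ ∃ a ∈ F, p a := by
  simp [List.mem_cons, or_and_right, exists_or]

-- ---- one BFS round: expanding the whole frontier ----
lemma expand_foldl (n t v : Int) :
    ∀ (F : List Int) (st : PySem.Dict Int Int × List Int),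
      (∀ z ∈ st.2, st.1.contains z = true) → st.1.keys.Nodup →
      (∀ z, st.1.contains z = true → (F.foldl (expandX n t v) st).1.get? z = st.1.get? z) ∧
      (∀ z, (F.foldl (expandX n t v) st).1.contains z = true ↔
        (st.1.contains z = true ∨ ∃ x ∈ F, z ∈ nbrsB n t x)) ∧
      (∀ z, st.1.contains z = false → (F.foldl (expandX n t v) st).1.contains z = true →
        (F.foldl (expandX n t v) st).1.get? z = some v) ∧
      (∀ z, z ∈ (F.foldl (expandX n t v) st).2 ↔
        (z ∈ st.2 ∨ (st.1.contains z = false ∧ ∃ x ∈ F, z ∈ nbrsB n t x))) ∧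
      (∀ z ∈ (F.foldl (expandX n t v) st).2, (F.foldl (expandX n t v) st).1.contains z = true) ∧
      (F.foldl (expandX n t v) st).1.keys.Nodup := by
  intro F
  induction F with
  | nil =>
    intro st hst hnd
    refine ⟨fun z _ => rfl, fun z => by simp, fun z h1 h2 => ?_, fun z => by simp, hst, hnd⟩
    simp only [List.foldl_nil] at h2
    rw [h1] at h2
    simp at h2
  | cons x F ih =>
    intro st hst hnd
    obtain ⟨a1, a2, a3, a4, a5, a6⟩ := addY_foldl v (nbrsB n t x) st hst hnd
    simp only [List.foldl_cons]
    have hx : expandX n t v st x = (nbrsB n t x).foldl (addY v) st := rfl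
    rw [hx]
    set st1 := (nbrsB n t x).foldl (addY v) st with hst1
    obtain ⟨d1, d2, d3, d4, d5, d6⟩ := ih st1 a5 a6
    refine ⟨fun z hz => ?_, fun z => ?_, fun z h1 h2 => ?_, fun z => ?_, d5, d6⟩
    · rw [d1 z ((a2 z).mpr (Or.inl hz)), a1 z hz]
    · rw [d2 z, a2 z, exists_cons_iff]
      tauto
    · cases hsz : st1.1.contains z with
      | true => rw [d1 z hsz]; exact a3 z h1 hsz
      | false => exact d3 z hsz h2
    · rw [d4 z, a4 z, exists_cons_iff]
      cases hsz : st.1.contains z with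
      | true =>
        have hsz1 : st1.1.contains z = true := (a2 z).mpr (Or.inl hsz)
        rw [hsz1]
        simp
      | false =>
        cases hsz1 : st1.1.contains z with
        | true =>
          have := (a2 z).mp hsz1
          rw [hsz] at this
          simp only [Bool.false_eq_true, false_or] at this
          tauto
        | false =>
          have hnb : z ∉ nbrsB n t x := fun hm => by
            rw [(a2 z).mpr (Or.inr hm)] at hsz1; simp at hsz1
          tauto

lemma reach_closed {n t : Int} {comp : PySem.Dict Int Int}
    (hcl : ∀ x, comp.contains x = true → ∀ y, SE n t x y → comp.contains y = true)
    {v z : Int} (hv : comp.contains v = true) (h : Reach n t v z) :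
    comp.contains z = true := by
  induction h with
  | refl => exact hv
  | tail _ hstep ih => exact hcl _ ih _ hstep

-- ---- the flood loop computes exactly the component of v ----
lemma flood_spec {n t v : Int} (hPre : 0 ≤ t ∨ n ≤ t) :
    ∀ (fuel : Nat) (comp : PySem.Dict Int Int) (F : List Int),
      (∀ x ∈ F, comp.get? x = some v ∧ Reach n t v x) →
      (∀ x, comp.contains x = true → x ∈ F ∨ ∀ y, SE n t x y → comp.contains y = true) →
      comp.contains v = true →
      (∀ x, comp.contains x = true → 1 ≤ x ∧ x ≤ n) →
      comp.keys.Nodup →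
      (F = [] ∨ n.toNat + 1 ≤ fuel + comp.size) →
      (∀ z, comp.contains z = true → (floodB n t v fuel comp F).get? z = comp.get? z) ∧
      (∀ z, comp.contains z = false → Reach n t v z →
        (floodB n t v fuel comp F).get? z = some v) ∧
      (∀ z, comp.contains z = false → ¬ Reach n t v z →
        (floodB n t v fuel comp F).get? z = none) ∧
      (floodB n t v fuel comp F).keys.Nodup := by
  intro fuel
  induction fuel with
  | zero =>
    intro comp F h1 h2 h3 h4 h5 h6
    have hF : F = [] := by
      rcases h6 with h | h
      · exact h
      · have := dict_size_le h5 h4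
        omega
    subst hF
    have hcl : ∀ x, comp.contains x = true → ∀ y, SE n t x y → comp.contains y = true := by
      intro x hx
      rcases h2 x hx with h | h
      · simp at h
      · exact h
    refine ⟨fun z _ => rfl, fun z hcz hr => ?_, fun z hcz _ => ?_, h5⟩
    · rw [reach_closed hcl h3 hr] at hcz; simp at hcz
    · exact (PySem.Dict.get?_eq_none_iff_contains comp z).mpr hcz
  | succ f ihf =>
    intro comp F h1 h2 h3 h4 h5 h6
    by_cases hF : F = []
    · subst hF
      have hcl : ∀ x, comp.contains x = true → ∀ y, SE n t x y → comp.contains y = true := by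
        intro x hx
        rcases h2 x hx with h | h
        · simp at h
        · exact h
      have hstep : floodB n t v (f + 1) comp [] = comp := by
        simp [floodB]
      rw [hstep]
      refine ⟨fun z _ => rfl, fun z hcz hr => ?_, fun z hcz _ => ?_, h5⟩
      · rw [reach_closed hcl h3 hr] at hcz; simp at hcz
      · exact (PySem.Dict.get?_eq_none_iff_contains comp z).mpr hcz
    · have hFe : F.isEmpty = false := by
        cases F with
        | nil => exact absurd rfl hF
        | cons a l => rfl
      have hstep : floodB n t v (f + 1) comp F =
          floodB n t v f (F.foldl (expandX n t v) (comp, [])).1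
            (F.foldl (expandX n t v) (comp, [])).2 := by
        simp only [floodB, hFe, Bool.false_eq_true, if_false]
      obtain ⟨d1, d2, d3, d4, d5, d6⟩ := expand_foldl n t v F (comp, [])
        (by intro z hz; simp at hz) h5
      set st := F.foldl (expandX n t v) (comp, []) with hstdef
      have hd4 : ∀ z, z ∈ st.2 ↔
          (PySem.Dict.contains comp z = false ∧ ∃ x ∈ F, z ∈ nbrsB n t x) := by
        intro z
        rw [d4 z]
        constructor
        · rintro (h | h)
          · simp at h
          · exact h
        · exact fun h => Or.inr h
      have hreach_new : ∀ z, (∃ x ∈ F, z ∈ nbrsB n t x) → Reach n t v z := by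
        rintro z ⟨x, hxF, hznb⟩
        exact Relation.ReflTransGen.tail (h1 x hxF).2 ((mem_nbrsB hPre x z).mp hznb)
      have H1 : ∀ x ∈ st.2, st.1.get? x = some v ∧ Reach n t v x := by
        intro x hx
        obtain ⟨hnc, hex⟩ := (hd4 x).mp hx
        exact ⟨d3 x hnc (d5 x hx), hreach_new x hex⟩
      have H2 : ∀ x, st.1.contains x = true →
          x ∈ st.2 ∨ ∀ y, SE n t x y → st.1.contains y = true := by
        intro x hx
        rcases (d2 x).mp hx with hc | hex
        · rcases h2 x hc with hxF | hcl
          · right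
            intro y hy
            exact (d2 y).mpr (Or.inr ⟨x, hxF, (mem_nbrsB hPre x y).mpr hy⟩)
          · right
            intro y hy
            exact (d2 y).mpr (Or.inl (hcl y hy))
        · cases hcx : PySem.Dict.contains comp x with
          | true =>
            rcases h2 x hcx with hxF | hcl
            · right
              intro y hy
              exact (d2 y).mpr (Or.inr ⟨x, hxF, (mem_nbrsB hPre x y).mpr hy⟩)
            · right
              intro y hy
              exact (d2 y).mpr (Or.inl (hcl y hy))
          | false =>
            left
            exact (hd4 x).mpr ⟨hcx, hex⟩
      have H3 : st.1.contains v = true := (d2 v).mpr (Or.inl h3)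
      have H4 : ∀ x, st.1.contains x = true → 1 ≤ x ∧ x ≤ n := by
        intro x hx
        rcases (d2 x).mp hx with hc | ⟨w, hwF, hnb⟩
        · exact h4 x hc
        · exact (se_bounds hPre ((mem_nbrsB hPre w x).mp hnb)).2
      have H6 : st.2 = [] ∨ n.toNat + 1 ≤ f + st.1.size := by
        cases hs2 : st.2 with
        | nil => exact Or.inl rfl
        | cons a l =>
          right
          have ha : a ∈ st.2 := by rw [hs2]; exact List.mem_cons_self
          obtain ⟨hnc, -⟩ := (hd4 a).mp ha
          have hlt : comp.size < st.1.size :=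
            dict_size_lt h5 d6 (fun z hz => (d2 z).mpr (Or.inl hz)) (d5 a ha) hnc
          rcases h6 with h | h
          · exact absurd h hF
          · omega
      obtain ⟨e1, e2, e3, e4⟩ := ihf st.1 st.2 H1 H2 H3 H4 d6 H6
      rw [hstep]
      refine ⟨fun z hcz => ?_, fun z hcz hr => ?_, fun z hcz hr => ?_, e4⟩
      · rw [e1 z ((d2 z).mpr (Or.inl hcz)), d1 z hcz]
      · cases hsz : st.1.contains z with
        | true => rw [e1 z hsz, d3 z hcz hsz]
        | false => exact e2 z hsz hr
      · cases hsz : st.1.contains z with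
        | true =>
          exfalso
          rcases (d2 z).mp hsz with hc | hex
          · rw [hcz] at hc; simp at hc
          · exact hr (hreach_new z hex)
        | false => exact e3 z hsz hr

-- ---- the sweep: labels are component representatives ----
def GoodC (n t : Int) (comp : PySem.Dict Int Int) : Prop :=
  comp.keys.Nodup ∧
  (∀ x, comp.contains x = true → 1 ≤ x ∧ x ≤ n) ∧
  (∀ x y, comp.contains x = true → SE n t x y → comp.contains y = true) ∧
  (∀ x w, comp.get? x = some w → Reach n t w x ∧ comp.get? w = some w) ∧
  (∀ x y wx wy, comp.get? x = some wx → comp.get? y = some wy → Reach n t x y → wx = wy)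

lemma sweep_foldl {n t : Int} (hPre : 0 ≤ t ∨ n ≤ t) :
    ∀ (l : List Int) (comp : PySem.Dict Int Int),
      (∀ v ∈ l, 1 ≤ v ∧ v ≤ n) → GoodC n t comp →
      GoodC n t (l.foldl (sweepB n t) comp) ∧
      (∀ z, (l.foldl (sweepB n t) comp).contains z = true ↔
        (comp.contains z = true ∨ ∃ v ∈ l, Reach n t v z)) := by
  intro l
  induction l with
  | nil =>
    intro comp _ hg
    exact ⟨hg, fun z => by simp⟩
  | cons v l ih =>
    intro comp hl hg
    obtain ⟨g1, g2, g3, g4, g5⟩ := hg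
    have hv : 1 ≤ v ∧ v ≤ n := hl v List.mem_cons_self
    simp only [List.foldl_cons]
    by_cases hcv : comp.contains v = true
    · have hstep : sweepB n t comp v = comp := by simp [sweepB, hcv]
      rw [hstep]
      obtain ⟨hg', hiff⟩ := ih comp (fun w hw => hl w (List.mem_cons_of_mem _ hw))
        ⟨g1, g2, g3, g4, g5⟩
      refine ⟨hg', fun z => ?_⟩
      rw [hiff z, exists_cons_iff]
      constructor
      · rintro (h | h)
        · exact Or.inl h
        · exact Or.inr (Or.inr h)
      · rintro (h | h | h)
        · exact Or.inl h
        · exact Or.inl (reach_closed (fun a ha b hb => g3 a b ha hb) hcv h)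
        · exact Or.inr h
    · have hcvf : comp.contains v = false := by simpa using hcv
      have hstep : sweepB n t comp v
          = floodB n t v (n.toNat + 2) (comp.insert v v) [v] := by
        simp [sweepB, hcvf]
      rw [hstep]
      set comp' := comp.insert v v with hcomp'
      have hins_get : ∀ z, comp'.get? z = if z = v then some v else comp.get? z := by
        intro z; rw [hcomp', PySem.Dict.get?_insert]
      have hins_con : ∀ z, comp'.contains z = true ↔ (z = v ∨ comp.contains z = true) := by
        intro z
        rw [hcomp', PySem.Dict.contains_insert]
        by_cases hz : z = v
        · subst hz; simp
        · rw [show (z == v) = false by simp [hz]]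
          simp [hz]
      obtain ⟨e1, e2, e3, e4⟩ := flood_spec hPre (n.toNat + 2) comp' [v]
        (by
          intro x hx
          rw [List.mem_singleton] at hx
          subst hx
          exact ⟨by rw [hins_get]; simp, Relation.ReflTransGen.refl⟩)
        (by
          intro x hx
          rcases (hins_con x).mp hx with hx | hx
          · exact Or.inl (by rw [hx]; exact List.mem_singleton.mpr rfl)
          · exact Or.inr (fun y hy => (hins_con y).mpr (Or.inr (g3 x y hx hy))))
        ((hins_con v).mpr (Or.inl rfl))
        (by
          intro x hx
          rcases (hins_con x).mp hx with hx | hx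
          · rw [hx]; exact hv
          · exact g2 x hx)
        (PySem.Dict.nodup_keys_insert _ _ _ g1)
        (Or.inr (by omega))
      set comp1 := floodB n t v (n.toNat + 2) comp' [v] with hcomp1
      -- value characterization of comp1
      have hval : ∀ z w, comp1.get? z = some w →
          (comp.contains z = true ∧ comp.get? z = some w) ∨
          (comp.contains z = false ∧ w = v ∧ Reach n t v z) := by
        intro z w hzw
        cases hcz : comp.contains z with
        | true =>
          left
          refine ⟨rfl, ?_⟩
          rw [← hzw, e1 z ((hins_con z).mpr (Or.inr hcz)), hins_get]
          rw [if_neg (fun he => by rw [he, hcvf] at hcz; simp at hcz)]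
        | false =>
          right
          refine ⟨rfl, ?_⟩
          by_cases hzv : z = v
          · subst hzv
            have := e1 z ((hins_con z).mpr (Or.inl rfl))
            rw [hins_get, if_pos rfl] at this
            rw [this] at hzw
            exact ⟨by injection hzw with h; exact h.symm, Relation.ReflTransGen.refl⟩
          · have hcz' : comp'.contains z = false := by
              cases hc : comp'.contains z
              · rfl
              · rcases (hins_con z).mp hc with h | h
                · exact absurd h hzv
                · rw [h] at hcz; simp at hcz
            by_cases hr : Reach n t v z
            · rw [e2 z hcz' hr] at hzw
              exact ⟨by injection hzw with h; exact h.symm, hr⟩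
            · rw [e3 z hcz' hr] at hzw
              simp at hzw
      have hget_old : ∀ z, comp.contains z = true → comp1.get? z = comp.get? z := by
        intro z hz
        rw [e1 z ((hins_con z).mpr (Or.inr hz)), hins_get]
        rw [if_neg (fun he => by rw [he, hcvf] at hz; simp at hz)]
      have hget_new : ∀ z, comp.contains z = false → Reach n t v z →
          comp1.get? z = some v := by
        intro z hz hr
        by_cases hzv : z = v
        · subst hzv
          rw [e1 z ((hins_con z).mpr (Or.inl rfl)), hins_get, if_pos rfl]
        · have hcz' : comp'.contains z = false := by
            cases hc : comp'.contains z
            · rfl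
            · rcases (hins_con z).mp hc with h | h
              · exact absurd h hzv
              · rw [h] at hz; simp at hz
          exact e2 z hcz' hr
      have hcon1 : ∀ z, comp1.contains z = true ↔
          (comp.contains z = true ∨ Reach n t v z) := by
        intro z
        rw [PySem.Dict.contains_eq_isSome_get?]
        constructor
        · intro hz
          cases hg : comp1.get? z with
          | none => rw [hg] at hz; simp at hz
          | some w =>
            rcases hval z w hg with ⟨h, -⟩ | ⟨-, -, h⟩
            · exact Or.inl h
            · exact Or.inr h
        · rintro (hz | hz)
          · rw [hget_old z hz, ← PySem.Dict.contains_eq_isSome_get?, hz]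
          · cases hcz : comp.contains z with
            | true => rw [hget_old z hcz]; rw [← PySem.Dict.contains_eq_isSome_get?, hcz]
            | false => rw [hget_new z hcz hz]; rfl
      have hclosed : ∀ a, comp.contains a = true → ∀ b, SE n t a b → comp.contains b = true :=
        fun a ha b hb => g3 a b ha hb
      have hgood1 : GoodC n t comp1 := by
        refine ⟨e4, ?_, ?_, ?_, ?_⟩
        · intro x hx
          rcases (hcon1 x).mp hx with h | h
          · exact g2 x h
          · exact reach_bounds hPre hv h
        · intro x y hx hy
          rcases (hcon1 x).mp hx with h | h
          · exact (hcon1 y).mpr (Or.inl (g3 x y h hy))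
          · exact (hcon1 y).mpr (Or.inr (Relation.ReflTransGen.tail h hy))
        · intro x w hxw
          rcases hval x w hxw with ⟨hc, hg⟩ | ⟨hc, hwv, hr⟩
          · obtain ⟨hr, hw⟩ := g4 x w hg
            refine ⟨hr, ?_⟩
            have hcw : comp.contains w = true := by
              rw [PySem.Dict.contains_eq_isSome_get?, hw]; rfl
            rw [hget_old w hcw, hw]
          · subst hwv
            refine ⟨hr, ?_⟩
            cases hcw : comp.contains w with
            | true => rw [hcw] at hcvf; simp at hcvf
            | false => exact hget_new w hcw Relation.ReflTransGen.refl
        · intro x y wx wy hx hy hr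
          rcases hval x wx hx with ⟨hcx, hgx⟩ | ⟨hcx, hwx, hrx⟩ <;>
            rcases hval y wy hy with ⟨hcy, hgy⟩ | ⟨hcy, hwy, hry⟩
          · exact g5 x y wx wy hgx hgy hr
          · exfalso
            rw [reach_closed hclosed hcx hr] at hcy
            simp at hcy
          · exfalso
            rw [reach_closed hclosed hcy (reach_symm hr)] at hcx
            simp at hcx
          · rw [hwx, hwy]
      obtain ⟨hg', hiff⟩ := ih comp1 (fun w hw => hl w (List.mem_cons_of_mem _ hw)) hgood1
      refine ⟨hg', fun z => ?_⟩
      rw [hiff z, hcon1 z, exists_cons_iff]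
      tauto

lemma compF_iff {n t : Int} (hPre : 0 ≤ t ∨ n ≤ t) (a b : Int) :
    ((PySem.List.pyRange 1 (n + 1) 1).foldl (sweepB n t) PySem.Dict.empty).getD a a
      = ((PySem.List.pyRange 1 (n + 1) 1).foldl (sweepB n t) PySem.Dict.empty).getD b b
    ↔ Reach n t a b := by
  have hgood0 : GoodC n t PySem.Dict.empty := by
    refine ⟨PySem.Dict.nodup_keys_empty, ?_, ?_, ?_, ?_⟩
    · intro x hx; rw [PySem.Dict.contains_empty] at hx; simp at hx
    · intro x y hx; rw [PySem.Dict.contains_empty] at hx; simp at hx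
    · intro x w hx; rw [PySem.Dict.get?_empty] at hx; simp at hx
    · intro x y wx wy hx; rw [PySem.Dict.get?_empty] at hx; simp at hx
  obtain ⟨⟨g1, g2, g3, g4, g5⟩, hiff⟩ := sweep_foldl hPre (PySem.List.pyRange 1 (n + 1) 1)
    PySem.Dict.empty
    (fun v hv => by rw [PySem.List.mem_pyRange_one] at hv; omega)
    hgood0
  set comp := (PySem.List.pyRange 1 (n + 1) 1).foldl (sweepB n t) PySem.Dict.empty
  have hcon : ∀ z, comp.contains z = true ↔ (1 ≤ z ∧ z ≤ n) := by
    intro z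
    constructor
    · exact g2 z
    · intro hz
      refine (hiff z).mpr (Or.inr ⟨z, ?_, Relation.ReflTransGen.refl⟩)
      rw [PySem.List.mem_pyRange_one]
      omega
  have hnc : ∀ z, ¬ (1 ≤ z ∧ z ≤ n) → comp.contains z = false := by
    intro z hz
    cases hc : comp.contains z with
    | false => rfl
    | true => exact absurd ((hcon z).mp hc) hz
  have hsome : ∀ z, comp.contains z = true → ∃ w, comp.get? z = some w := by
    intro z hz
    rw [PySem.Dict.contains_eq_isSome_get?] at hz
    cases hg : comp.get? z with
    | none => rw [hg] at hz; simp at hz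
    | some w => exact ⟨w, rfl⟩
  have hgetD : ∀ z w, comp.get? z = some w → comp.getD z z = w := by
    intro z w hz
    rw [PySem.Dict.getD_eq_get?_getD, hz]
    rfl
  by_cases hain : 1 ≤ a ∧ a ≤ n <;> by_cases hbin : 1 ≤ b ∧ b ≤ n
  · obtain ⟨wa, hwa⟩ := hsome a ((hcon a).mpr hain)
    obtain ⟨wb, hwb⟩ := hsome b ((hcon b).mpr hbin)
    rw [hgetD a wa hwa, hgetD b wb hwb]
    constructor
    · intro he
      obtain ⟨hra, hga⟩ := g4 a wa hwa
      obtain ⟨hrb, hgb⟩ := g4 b wb hwb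
      exact (reach_symm hra).trans (he ▸ hrb)
    · exact g5 a b wa wb hwa hwb
  · obtain ⟨wa, hwa⟩ := hsome a ((hcon a).mpr hain)
    have hwain : 1 ≤ wa ∧ wa ≤ n := by
      apply g2
      rw [PySem.Dict.contains_eq_isSome_get?, (g4 a wa hwa).2]
      rfl
    rw [hgetD a wa hwa]
    rw [PySem.Dict.getD_of_not_contains _ b (hnc b hbin)]
    constructor
    · intro he; exact absurd (he ▸ hwain) hbin
    · intro hr; exact absurd (reach_bounds hPre hain hr) hbin
  · obtain ⟨wb, hwb⟩ := hsome b ((hcon b).mpr hbin)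
    have hwbin : 1 ≤ wb ∧ wb ≤ n := by
      apply g2
      rw [PySem.Dict.contains_eq_isSome_get?, (g4 b wb hwb).2]
      rfl
    rw [hgetD b wb hwb]
    rw [PySem.Dict.getD_of_not_contains _ a (hnc a hain)]
    constructor
    · intro he; exact absurd (he.symm ▸ hwbin) hain
    · intro hr; exact absurd (reach_bounds hPre hbin (reach_symm hr)) hain
  · rw [PySem.Dict.getD_of_not_contains _ a (hnc a hain)]
    rw [PySem.Dict.getD_of_not_contains _ b (hnc b hbin)]
    constructor
    · rintro rfl; exact Relation.ReflTransGen.refl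
    · intro hr; exact (reach_out hPre hain hr).symm

-- ===== VERDICT (by name: the statement is the Claim_ definition above) =====
theorem areConnected_spec : Claim_equal_areConnected := by
  intro n threshold queries _hDom hPre
  show areConnected n threshold queries = areConnected_alt n threshold queries
  unfold areConnected areConnected_alt
  obtain ⟨hv, hiff⟩ := finalA_good (n := n) (t := threshold) hPre.1
  set UF := (PySem.List.pyRange (threshold + 1) (n + 1) 1).foldl (outerA n) PySem.Dict.empty
    with hUF
  set comp := (PySem.List.pyRange 1 (n + 1) 1).foldl (sweepB n threshold) PySem.Dict.empty
    with hcomp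
  have hlab : ∀ x y : Int, rootD UF x = rootD UF y ↔ comp.getD x x = comp.getD y y := by
    intro x y
    exact ((hiff x y).trans (eqvGen_iff_rtg x y)).trans (compF_iff hPre.1 x y).symm
  rw [@query_sim (fun x => comp.getD x x) queries UF [] hv hlab]
  simp
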